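-- pv_equiv track=rewrite | github.com/dheater/viewyard | scripts/onboard.py | fuzzy_search_repos
-- ===== SOURCE A (Python) =====
-- from typing import Dict, List, Any
--
-- def fuzzy_search_repos(
--         repos: List[Dict[str, str]], query: str) -> List[Dict[str, str]]:
--     """Simple fuzzy search for repositories"""
--     if not query:
--         return repos
--
--     query = query.lower()
--     matches = []
--
--     for repo in repos:
--         name = repo["name"].lower()
--
--         # Simple matching: exact match, starts with, or contains
--         if query == name:
--             score = 100
--         elif name.startswith(query):
--             score = 50
--         elif query in name:
--             score = 25
--         else:
--             continue  # No match
--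
--         matches.append((score, repo))
--
--     # Sort by score (descending) and return repos
--     matches.sort(key=lambda x: x[0], reverse=True)
--     return [repo for score, repo in matches]
-- ===== SOURCE B (Python) =====
-- def fuzzy_search_repos(repos, query):
--     """Simple fuzzy search for repositories (bucket version, no sort)."""
--     if not query:
--         return repos
--
--     q = query.lower()
--     exact, prefix, substring = [], [], []
--
--     for repo in repos:
--         name = repo["name"].lower()
--         if q == name:
--             exact.append(repo)
--         elif name.startswith(q):
--             prefix.append(repo)
--         elif q in name:
--             substring.append(repo)
--
--     return exact + prefix + substring
-- ===== Notes on version B (the rewrite author's own statement) =====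
-- stated objective: simpler
-- what changed: Replaced building (score, repo) tuples and stable-sorting them by descending score with a single pass that appends each repo to one of three priority buckets (exact, prefix, substring) and concatenates the buckets, eliminating the sort and the score values entirely.
import Mathlib
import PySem

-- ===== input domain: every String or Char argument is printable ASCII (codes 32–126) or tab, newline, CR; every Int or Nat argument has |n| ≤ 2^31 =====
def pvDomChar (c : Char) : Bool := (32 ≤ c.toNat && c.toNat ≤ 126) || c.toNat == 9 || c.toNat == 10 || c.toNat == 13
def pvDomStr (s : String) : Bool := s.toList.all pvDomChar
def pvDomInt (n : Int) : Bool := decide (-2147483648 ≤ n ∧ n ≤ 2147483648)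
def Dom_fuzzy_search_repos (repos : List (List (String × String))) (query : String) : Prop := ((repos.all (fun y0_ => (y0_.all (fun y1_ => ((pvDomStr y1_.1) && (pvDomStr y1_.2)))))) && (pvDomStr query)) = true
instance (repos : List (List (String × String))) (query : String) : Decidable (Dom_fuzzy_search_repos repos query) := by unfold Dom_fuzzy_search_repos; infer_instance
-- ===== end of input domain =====

-- B changes the decomposition: one pass into three priority buckets instead of scoring and stable-sorting (equivalence of the return values).

-- dict access repo["name"]: first match in the association list; the "" default is unreachable under Pre_ (which demands the key)
def pvGetName (repo : List (String × String)) : String :=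
  ((repo.find? (fun kv => kv.1 == "name")).map (fun kv => kv.2)).getD ""

-- ===== PORT A =====
-- loop body of A (the elif score chain), named so the proofs can cite it
def pvStepA (q : String) (acc : List (Int × List (String × String))) (repo : List (String × String)) : List (Int × List (String × String)) :=
  let name := PySem.Str.lower (pvGetName repo)
  if q = name then acc ++ [((100 : Int), repo)]
  else if PySem.Str.startswith name q then acc ++ [((50 : Int), repo)]
  else if PySem.Str.isIn q name then acc ++ [((25 : Int), repo)]
  else acc

def fuzzy_search_repos (repos : List (List (String × String))) (query : String) : List (List (String × String)) :=
  if query = "" then repos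
  else
    let q := PySem.Str.lower query
    let matchList : List (Int × List (String × String)) := repos.foldl (pvStepA q) []
    (PySem.List.sorted matchList (fun x => x.1) true).map (fun x => x.2)

-- ===== PORT B =====
-- loop body of B (the same elif chain appending to one of the three buckets)
def pvStepB (q : String) (acc : List (List (String × String)) × List (List (String × String)) × List (List (String × String))) (repo : List (String × String)) : List (List (String × String)) × List (List (String × String)) × List (List (String × String)) :=
  let name := PySem.Str.lower (pvGetName repo)
  if q = name then (acc.1 ++ [repo], acc.2.1, acc.2.2)
  else if PySem.Str.startswith name q then (acc.1, acc.2.1 ++ [repo], acc.2.2)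
  else if PySem.Str.isIn q name then (acc.1, acc.2.1, acc.2.2 ++ [repo])
  else acc

def fuzzy_search_repos_alt (repos : List (List (String × String))) (query : String) : List (List (String × String)) :=
  if query = "" then repos
  else
    let q := PySem.Str.lower query
    let buckets := repos.foldl (pvStepB q) ([], [], [])
    buckets.1 ++ buckets.2.1 ++ buckets.2.2

-- ===== PRECONDITION & SPEC =====
-- Pre_ excludes exactly the inputs where Python raises KeyError: a nonempty query with some repo lacking a "name" key.
def Pre_fuzzy_search_repos (repos : List (List (String × String))) (query : String) : Prop :=
  query = "" ∨ (repos.all (fun repo => repo.any (fun kv => kv.1 == "name"))) = true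
instance (repos : List (List (String × String))) (query : String) : Decidable (Pre_fuzzy_search_repos repos query) := by unfold Pre_fuzzy_search_repos; infer_instance

def pvWitness_fuzzy_search_repos : (List (List (String × String))) × String :=
  ([[("name", "Alpha")], [("name", "beta"), ("url", "x")], [("name", "gamma")]], "a")

def Spec_fuzzy_search_repos (repos : List (List (String × String))) (query : String) (out : List (List (String × String))) : Prop := out = fuzzy_search_repos_alt repos query
instance (repos : List (List (String × String))) (query : String) (out : List (List (String × String))) : Decidable (Spec_fuzzy_search_repos repos query out) := by unfold Spec_fuzzy_search_repos; infer_instance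

-- ===== CLAIM (what is proved, stated in full; the proofs are below) =====
def Claim_equal_fuzzy_search_repos : Prop := ∀ (repos : List (List (String × String))) (query : String), Dom_fuzzy_search_repos repos query → Pre_fuzzy_search_repos repos query → Spec_fuzzy_search_repos repos query (fuzzy_search_repos repos query)

-- ===== LEMMAS AND PROOFS =====

-- classification predicates (fixed lowered query q)
def pvNm (repo : List (String × String)) : String := PySem.Str.lower (pvGetName repo)
def pvE (q : String) (repo : List (String × String)) : Bool := q == pvNm repo
def pvP (q : String) (repo : List (String × String)) : Bool := !pvE q repo && PySem.Str.startswith (pvNm repo) q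
def pvS (q : String) (repo : List (String × String)) : Bool := !pvE q repo && !PySem.Str.startswith (pvNm repo) q && PySem.Str.isIn q (pvNm repo)

-- the match list A builds, as a structural recursion
def pvM (q : String) : List (List (String × String)) → List (Int × List (String × String))
  | [] => []
  | r :: t =>
    if q = pvNm r then (100, r) :: pvM q t
    else if PySem.Str.startswith (pvNm r) q then (50, r) :: pvM q t
    else if PySem.Str.isIn q (pvNm r) then (25, r) :: pvM q t
    else pvM q t

-- evaluation lemmas for the two loop bodies and for pvM, one per branch of the elif chain
lemma pvStepA_e {q : String} {r : List (String × String)} (acc : List (Int × List (String × String))) (h1 : q = pvNm r) :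
    pvStepA q acc r = acc ++ [(100, r)] := by simp [pvStepA, pvNm] at h1 ⊢; simp [h1]
lemma pvStepA_p {q : String} {r : List (String × String)} (acc : List (Int × List (String × String))) (h1 : ¬ q = pvNm r)
    (h2 : PySem.Str.startswith (pvNm r) q = true) : pvStepA q acc r = acc ++ [(50, r)] := by
  simp [pvStepA, pvNm] at h1 h2 ⊢; simp [h1, h2]
lemma pvStepA_s {q : String} {r : List (String × String)} (acc : List (Int × List (String × String))) (h1 : ¬ q = pvNm r)
    (h2 : ¬ PySem.Str.startswith (pvNm r) q = true) (h3 : PySem.Str.isIn q (pvNm r) = true) :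
    pvStepA q acc r = acc ++ [(25, r)] := by
  simp [pvStepA, pvNm] at h1 h2 h3 ⊢; simp [h1, h2, h3]
lemma pvStepA_n {q : String} {r : List (String × String)} (acc : List (Int × List (String × String))) (h1 : ¬ q = pvNm r)
    (h2 : ¬ PySem.Str.startswith (pvNm r) q = true) (h3 : ¬ PySem.Str.isIn q (pvNm r) = true) :
    pvStepA q acc r = acc := by
  simp [pvStepA, pvNm] at h1 h2 h3 ⊢; simp [h1, h2, h3]

lemma pvStepB_e {q : String} {r : List (String × String)} (acc : List (List (String × String)) × List (List (String × String)) × List (List (String × String))) (h1 : q = pvNm r) :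
    pvStepB q acc r = (acc.1 ++ [r], acc.2.1, acc.2.2) := by simp [pvStepB, pvNm] at h1 ⊢; simp [h1]
lemma pvStepB_p {q : String} {r : List (String × String)} (acc : List (List (String × String)) × List (List (String × String)) × List (List (String × String))) (h1 : ¬ q = pvNm r)
    (h2 : PySem.Str.startswith (pvNm r) q = true) : pvStepB q acc r = (acc.1, acc.2.1 ++ [r], acc.2.2) := by
  simp [pvStepB, pvNm] at h1 h2 ⊢; simp [h1, h2]
lemma pvStepB_s {q : String} {r : List (String × String)} (acc : List (List (String × String)) × List (List (String × String)) × List (List (String × String))) (h1 : ¬ q = pvNm r)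
    (h2 : ¬ PySem.Str.startswith (pvNm r) q = true) (h3 : PySem.Str.isIn q (pvNm r) = true) :
    pvStepB q acc r = (acc.1, acc.2.1, acc.2.2 ++ [r]) := by
  simp [pvStepB, pvNm] at h1 h2 h3 ⊢; simp [h1, h2, h3]
lemma pvStepB_n {q : String} {r : List (String × String)} (acc : List (List (String × String)) × List (List (String × String)) × List (List (String × String))) (h1 : ¬ q = pvNm r)
    (h2 : ¬ PySem.Str.startswith (pvNm r) q = true) (h3 : ¬ PySem.Str.isIn q (pvNm r) = true) :
    pvStepB q acc r = acc := by
  simp [pvStepB, pvNm] at h1 h2 h3 ⊢; simp [h1, h2, h3]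

lemma pvA_matches (q : String) (repos : List (List (String × String)))
    (acc : List (Int × List (String × String))) :
    repos.foldl (pvStepA q) acc = acc ++ pvM q repos := by
  induction repos generalizing acc with
  | nil => simp [pvM]
  | cons r t ih =>
    simp only [List.foldl_cons]
    by_cases h1 : q = pvNm r
    · rw [pvStepA_e acc h1, ih]; simp [pvM, h1]
    · by_cases h2 : PySem.Chars.startswith (pvNm r).toList q.toList = true
      · rw [pvStepA_p acc h1 (by simpa using h2), ih]; simp [pvM, h1, h2]
      · by_cases h3 : PySem.Chars.isIn q.toList (pvNm r).toList = true
        · rw [pvStepA_s acc h1 (by simpa using h2) (by simpa using h3), ih]; simp [pvM, h1, h2, h3]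
        · rw [pvStepA_n acc h1 (by simpa using h2) (by simpa using h3), ih]; simp [pvM, h1, h2, h3]

lemma pvB_buckets (q : String) (repos : List (List (String × String)))
    (e p s : List (List (String × String))) :
    repos.foldl (pvStepB q) (e, p, s)
    = (e ++ repos.filter (pvE q), p ++ repos.filter (pvP q), s ++ repos.filter (pvS q)) := by
  induction repos generalizing e p s with
  | nil => simp
  | cons r t ih =>
    simp only [List.foldl_cons, List.filter_cons]
    by_cases h1 : q = pvNm r
    · rw [pvStepB_e (e, p, s) h1]; simp only [ih]
      simp [pvE, pvP, pvS, h1, List.append_assoc]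
    · by_cases h2 : PySem.Chars.startswith (pvNm r).toList q.toList = true
      · rw [pvStepB_p (e, p, s) h1 (by simpa using h2)]; simp only [ih]
        simp [pvE, pvP, pvS, h1, h2, List.append_assoc]
      · by_cases h3 : PySem.Chars.isIn q.toList (pvNm r).toList = true
        · rw [pvStepB_s (e, p, s) h1 (by simpa using h2) (by simpa using h3)]; simp only [ih]
          simp [pvE, pvP, pvS, h1, h2, h3, List.append_assoc]
        · rw [pvStepB_n (e, p, s) h1 (by simpa using h2) (by simpa using h3)]; simp only [ih]
          simp [pvE, pvP, pvS, h1, h2, h3]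

lemma pvM_keys (q : String) (repos : List (List (String × String))) :
    ∀ x ∈ pvM q repos, x.1 = 100 ∨ x.1 = 50 ∨ x.1 = 25 := by
  induction repos with
  | nil => simp [pvM]
  | cons r t ih =>
    intro x hx
    simp only [pvM] at hx
    split_ifs at hx
    · rcases List.mem_cons.mp hx with rfl | hx
      · simp
      · exact ih x hx
    · rcases List.mem_cons.mp hx with rfl | hx
      · simp
      · exact ih x hx
    · rcases List.mem_cons.mp hx with rfl | hx
      · simp
      · exact ih x hx
    · exact ih x hx

lemma pvM_filter100 (q : String) (repos : List (List (String × String))) :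
    (pvM q repos).filter (fun x => x.1 == 100) = (repos.filter (pvE q)).map (fun r => ((100 : Int), r)) := by
  induction repos with
  | nil => simp [pvM]
  | cons r t ih =>
    simp only [pvM, List.filter_cons]
    by_cases h1 : q = pvNm r
    · subst h1; simp [pvE, ih]
    · by_cases h2 : PySem.Chars.startswith (pvNm r).toList q.toList = true
      · simp [pvE, h1, h2, ih]
      · by_cases h3 : PySem.Chars.isIn q.toList (pvNm r).toList = true
        · simp [pvE, h1, h2, h3, ih]
        · simp [pvE, h1, h2, h3, ih]

lemma pvM_filter50 (q : String) (repos : List (List (String × String))) :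
    (pvM q repos).filter (fun x => x.1 == 50) = (repos.filter (pvP q)).map (fun r => ((50 : Int), r)) := by
  induction repos with
  | nil => simp [pvM]
  | cons r t ih =>
    simp only [pvM, List.filter_cons]
    by_cases h1 : q = pvNm r
    · subst h1; simp [pvP, pvE, ih]
    · by_cases h2 : PySem.Chars.startswith (pvNm r).toList q.toList = true
      · simp [pvP, pvE, h1, h2, ih]
      · by_cases h3 : PySem.Chars.isIn q.toList (pvNm r).toList = true
        · simp [pvP, pvE, h1, h2, h3, ih]
        · simp [pvP, pvE, h1, h2, h3, ih]

lemma pvM_filter25 (q : String) (repos : List (List (String × String))) :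
    (pvM q repos).filter (fun x => x.1 == 25) = (repos.filter (pvS q)).map (fun r => ((25 : Int), r)) := by
  induction repos with
  | nil => simp [pvM]
  | cons r t ih =>
    simp only [pvM, List.filter_cons]
    by_cases h1 : q = pvNm r
    · subst h1; simp [pvS, pvE, ih]
    · by_cases h2 : PySem.Chars.startswith (pvNm r).toList q.toList = true
      · simp [pvS, pvE, h1, h2, ih]
      · by_cases h3 : PySem.Chars.isIn q.toList (pvNm r).toList = true
        · simp [pvS, pvE, h1, h2, h3, ih]
        · simp [pvS, pvE, h1, h2, h3, ih]

-- insertBy passes over a block where `before` never holds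
lemma pvInsertBy_append {α : Type} (before : α → α → Bool) (x : α) (e rest : List α)
    (he : ∀ y ∈ e, before x y = false) :
    PySem.List.insertBy before x (e ++ rest) = e ++ PySem.List.insertBy before x rest := by
  induction e with
  | nil => simp
  | cons y t ih =>
    have hy : before x y = false := he y (by simp)
    simp only [List.cons_append, PySem.List.insertBy, hy]
    simp [ih (fun z hz => he z (by simp [hz]))]

-- inserting in front of a block on which `before` always holds
lemma pvInsertBy_front {α : Type} (before : α → α → Bool) (x : α) (rest : List α)
    (h : ∀ y ∈ rest, before x y = true) :
    PySem.List.insertBy before x rest = x :: rest := by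
  cases rest with
  | nil => rfl
  | cons y t => simp [PySem.List.insertBy, h y (by simp)]

-- the stable descending sort of a {100,50,25}-keyed list is its three key-buckets in order
lemma pvSorted_buckets (ms : List (Int × List (String × String)))
    (h : ∀ x ∈ ms, x.1 = 100 ∨ x.1 = 50 ∨ x.1 = 25) :
    PySem.List.sorted ms (fun x => x.1) true
      = ms.filter (fun x => x.1 == 100) ++ ms.filter (fun x => x.1 == 50) ++ ms.filter (fun x => x.1 == 25) := by
  rw [PySem.List.sorted_rev_eq_foldl_insertBy]
  suffices H : ∀ (ms : List (Int × List (String × String)))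
      (e p s : List (Int × List (String × String))),
      (∀ x ∈ ms, x.1 = 100 ∨ x.1 = 50 ∨ x.1 = 25) →
      (∀ x ∈ e, x.1 = 100) → (∀ x ∈ p, x.1 = 50) → (∀ x ∈ s, x.1 = 25) →
      ms.foldl (fun acc x => PySem.List.insertBy (fun a b => decide (b.1 < a.1)) x acc) (e ++ p ++ s)
        = (e ++ ms.filter (fun x => x.1 == 100)) ++ (p ++ ms.filter (fun x => x.1 == 50)) ++ (s ++ ms.filter (fun x => x.1 == 25)) by
    simpa using H ms [] [] [] h (by simp) (by simp) (by simp)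
  intro ms
  induction ms with
  | nil => intro e p s _ _ _ _; simp
  | cons m t ih =>
    intro e p s hm he hp hs
    have hmk := hm m (by simp)
    simp only [List.foldl_cons, List.filter_cons]
    rcases hmk with h100 | h50 | h25
    · have step : PySem.List.insertBy (fun a b => decide (b.1 < a.1)) m (e ++ p ++ s)
          = (e ++ [m]) ++ p ++ s := by
        rw [List.append_assoc, pvInsertBy_append _ _ e (p ++ s)
          (fun y hy => by simp [he y hy, h100])]
        rw [pvInsertBy_front _ _ (p ++ s) ?_]
        · simp
        · intro y hy
          have hk : y.1 = 50 ∨ y.1 = 25 := by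
            rcases List.mem_append.mp hy with hz | hz
            · exact Or.inl (hp y hz)
            · exact Or.inr (hs y hz)
          simp only [decide_eq_true_eq]
          omega
      rw [step, ih (e ++ [m]) p s (fun x hx => hm x (by simp [hx]))
        (fun x hx => by rcases List.mem_append.mp hx with hx | hx
                        · exact he x hx
                        · simp at hx; simp [hx, h100]) hp hs]
      simp [h100, List.append_assoc]
    · have step : PySem.List.insertBy (fun a b => decide (b.1 < a.1)) m (e ++ p ++ s)
          = e ++ (p ++ [m]) ++ s := by
        rw [List.append_assoc, pvInsertBy_append _ _ e (p ++ s)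
          (fun y hy => by simp [he y hy, h50])]
        rw [pvInsertBy_append _ _ p s (fun y hy => by simp [hp y hy, h50])]
        rw [pvInsertBy_front _ _ s ?_]
        · simp
        · intro y hy
          have hk := hs y hy
          simp only [decide_eq_true_eq]
          omega
      rw [step, ih e (p ++ [m]) s (fun x hx => hm x (by simp [hx])) he
        (fun x hx => by rcases List.mem_append.mp hx with hx | hx
                        · exact hp x hx
                        · simp at hx; simp [hx, h50]) hs]
      simp [h50, List.append_assoc]
    · have step : PySem.List.insertBy (fun a b => decide (b.1 < a.1)) m (e ++ p ++ s)
          = e ++ p ++ (s ++ [m]) := by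
        rw [PySem.List.insertBy_of_forall_not_before _ _ _ ?_]
        · simp [List.append_assoc]
        · intro y hy
          rcases List.mem_append.mp hy with hy | hy
          · rcases List.mem_append.mp hy with hy | hy
            · simp [he y hy, h25]
            · simp [hp y hy, h25]
          · simp [hs y hy, h25]
      rw [step, ih e p (s ++ [m]) (fun x hx => hm x (by simp [hx])) he hp
        (fun x hx => by rcases List.mem_append.mp hx with hx | hx
                        · exact hs x hx
                        · simp at hx; simp [hx, h25])]
      simp [h25, List.append_assoc]

-- ===== VERDICT (by name: the statement is the Claim_ definition above) =====
theorem fuzzy_search_repos_spec : Claim_equal_fuzzy_search_repos := by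
  intro repos query _ _
  unfold Spec_fuzzy_search_repos fuzzy_search_repos fuzzy_search_repos_alt
  by_cases hq : query = ""
  · simp [hq]
  · simp only [hq, if_false]
    rw [pvA_matches, pvB_buckets]
    rw [List.nil_append, pvSorted_buckets _ (pvM_keys _ _)]
    rw [pvM_filter100, pvM_filter50, pvM_filter25]
    simp
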